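-- pv_equiv track=rewrite | github.com/BNukhkadiev/Knowledge-Graphs | src/protograph/maschine_init.py | min_hops_upward_from_roots
-- ===== SOURCE A (Python) =====
-- from collections import defaultdict, deque
--
-- def min_hops_upward_from_roots(
--     roots: list[str],
--     parents: dict[str, set[str]],
-- ) -> dict[str, int]:
--     """For each class reachable via ``rdfs:subClassOf`` upward from ``roots``, shortest hop count from the nearest root."""
--     if not roots:
--         return {}
--     dist: dict[str, int] = {}
--     q: deque[str] = deque()
--     for r in roots:
--         if r not in dist:
--             dist[r] = 0
--             q.append(r)
--     while q:
--         u = q.popleft()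
--         du = dist[u]
--         for par in parents.get(u, ()):
--             nd = du + 1
--             if par not in dist or nd < dist[par]:
--                 dist[par] = nd
--                 q.append(par)
--     return dist
-- ===== SOURCE B (Python) =====
-- def min_hops_upward_from_roots(
--     roots: list[str],
--     parents: dict[str, set[str]],
-- ) -> dict[str, int]:
--     """Level-synchronous BFS: sweep whole frontiers with a scalar level counter
--     instead of a deque with per-node distance lookups and a decrease-key test."""
--     dist: dict[str, int] = {}
--     frontier: list[str] = []
--     for r in roots:
--         if r not in dist:
--             dist[r] = 0
--             frontier.append(r)
--     level = 0
--     while frontier: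
--         nxt: list[str] = []
--         for u in frontier:
--             for par in parents.get(u, ()):
--                 if par not in dist:
--                     dist[par] = level + 1
--                     nxt.append(par)
--         frontier = nxt
--         level += 1
--     return dist
-- ===== Notes on version B (the rewrite author's own statement) =====
-- stated objective: alternative
-- what changed: Replaces the deque-based BFS (per-node dict distance lookups plus a decrease-key test on every edge) by a level-synchronous BFS that sweeps whole frontier lists with a scalar level counter, assigning level+1 to each newly seen parent.
import Mathlib
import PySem

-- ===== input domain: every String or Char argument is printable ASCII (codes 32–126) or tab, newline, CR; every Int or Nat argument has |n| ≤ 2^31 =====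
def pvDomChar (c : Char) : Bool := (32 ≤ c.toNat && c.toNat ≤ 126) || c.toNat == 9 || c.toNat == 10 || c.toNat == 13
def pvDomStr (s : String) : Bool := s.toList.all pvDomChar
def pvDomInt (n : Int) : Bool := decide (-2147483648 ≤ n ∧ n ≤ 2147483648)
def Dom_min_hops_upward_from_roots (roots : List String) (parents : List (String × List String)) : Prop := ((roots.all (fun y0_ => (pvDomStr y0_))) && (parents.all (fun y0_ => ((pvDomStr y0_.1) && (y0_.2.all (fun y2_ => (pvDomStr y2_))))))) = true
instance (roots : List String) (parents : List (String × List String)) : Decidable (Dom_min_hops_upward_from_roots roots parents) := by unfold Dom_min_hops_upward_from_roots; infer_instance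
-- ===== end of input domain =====

-- B replaces A's deque BFS (per-node dict distance lookups plus a decrease-key test) by a
-- level-synchronous BFS: whole-frontier sweeps with a scalar level counter (objective: alternative).
-- Both Python while-loops are ported with an explicit fuel argument pvFuel; the proof below shows
-- the fuel is never exhausted, so each port computes exactly what its Python computes.

-- shared trivial helper: Python 'parents.get(u, ())' (assoc-list lookup = first match)
def pvGetParents (parents : List (String × List String)) (u : String) : List String :=
  match parents.find? (fun p => p.1 == u) with
  | some p => p.2
  | none => []

-- fuel bound for both loops (proved sufficient below; the loops never hit 0)
def pvFuel (roots : List String) (parents : List (String × List String)) : Nat :=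
  roots.length + 2 * (roots.length + (parents.flatMap (fun p => p.2)).length) + 1

-- both Pythons share the same root-initialisation loop, transliterated identically
def pvInit (roots : List String) : PySem.Dict String Int × List String :=
  roots.foldl
    (fun (p : PySem.Dict String Int × List String) r =>
      if p.1.contains r then p else (p.1.insert r 0, p.2 ++ [r]))
    (PySem.Dict.empty, [])

-- ===== PORT A =====
-- body of A's 'for par in parents.get(u, ())' loop; du = dist[u], nd = du + 1
def pvStepA (du : Int) (p : PySem.Dict String Int × List String) (par : String) :
    PySem.Dict String Int × List String :=
  -- 'if par not in dist or nd < dist[par]' (short-circuit)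
  match p.1.get? par with
  | none => (p.1.insert par (du + 1), p.2 ++ [par])
  | some v => if du + 1 < v then (p.1.insert par (du + 1), p.2 ++ [par]) else p

-- A's 'while q:' loop; appended parents go to the back of the queue
def pvLoopA (parents : List (String × List String)) :
    Nat → PySem.Dict String Int → List String → PySem.Dict String Int
  | 0, dist, _ => dist
  | _ + 1, dist, [] => dist
  | f + 1, dist, u :: rest =>
    -- du := dist[u]; u is always a key of dist here (Python would raise KeyError otherwise)
    let du := dist.getD u 0
    let s := (pvGetParents parents u).foldl (pvStepA du) (dist, [])
    pvLoopA parents f s.1 (rest ++ s.2)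

def min_hops_upward_from_roots (roots : List String) (parents : List (String × List String)) : List (String × Int) :=
  if roots = [] then []
  else
    let init := pvInit roots
    (pvLoopA parents (pvFuel roots parents) init.1 init.2).items

-- ===== PORT B =====
-- body of B's inner 'for par in parents.get(u, ())' loop (no value lookup, no decrease-key)
def pvStepB (level : Int) (p : PySem.Dict String Int × List String) (par : String) :
    PySem.Dict String Int × List String :=
  match p.1.get? par with
  | none => (p.1.insert par (level + 1), p.2 ++ [par])
  | some _ => p

-- B's 'for u in frontier' sweep building (dist, nxt)
def pvLevelB (parents : List (String × List String)) (level : Int)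
    (st : PySem.Dict String Int × List String) (front : List String) :
    PySem.Dict String Int × List String :=
  front.foldl (fun p u => (pvGetParents parents u).foldl (pvStepB level) p) st

-- B's 'while frontier:' loop with the scalar level counter
def pvLoopB (parents : List (String × List String)) :
    Nat → PySem.Dict String Int → List String → Int → PySem.Dict String Int
  | 0, dist, _, _ => dist
  | _ + 1, dist, [], _ => dist
  | f + 1, dist, front, level =>
    let s := pvLevelB parents level (dist, []) front
    pvLoopB parents f s.1 s.2 (level + 1)

def min_hops_upward_from_roots_alt (roots : List String) (parents : List (String × List String)) : List (String × Int) :=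
  let init := pvInit roots
  (pvLoopB parents (pvFuel roots parents) init.1 init.2 0).items

-- ===== PRECONDITION & SPEC =====
def Spec_min_hops_upward_from_roots (roots : List String) (parents : List (String × List String)) (out : List (String × Int)) : Prop := out = min_hops_upward_from_roots_alt roots parents
instance (roots : List String) (parents : List (String × List String)) (out : List (String × Int)) : Decidable (Spec_min_hops_upward_from_roots roots parents out) := by unfold Spec_min_hops_upward_from_roots; infer_instance

-- ===== CLAIM (what is proved, stated in full; the proofs are below) =====
def Claim_equal_min_hops_upward_from_roots : Prop := ∀ (roots : List String) (parents : List (String × List String)), Dom_min_hops_upward_from_roots roots parents → Spec_min_hops_upward_from_roots roots parents (min_hops_upward_from_roots roots parents)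

-- ===== LEMMAS AND PROOFS =====

-- the finite universe of all keys the dicts can ever hold
def pvUniv (roots : List String) (parents : List (String × List String)) : Finset String :=
  (roots ++ parents.flatMap (fun p => p.2)).toFinset

-- number of universe keys not yet in dist
def pvFree (roots : List String) (parents : List (String × List String))
    (dist : PySem.Dict String Int) : Nat :=
  (pvUniv roots parents \ dist.keys.toFinset).card

theorem pvGetParents_sub (parents : List (String × List String)) (u x : String)
    (hx : x ∈ pvGetParents parents u) : x ∈ parents.flatMap (fun p => p.2) := by
  unfold pvGetParents at hx
  cases h : parents.find? (fun p => p.1 == u) with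
  | none => rw [h] at hx; simp at hx
  | some pr =>
    rw [h] at hx
    exact List.mem_flatMap.mpr ⟨pr, List.mem_of_find?_eq_some h, hx⟩

-- existing entries survive a pvStepB fold
theorem foldB_pres (L : Int) (ps : List String) (d : PySem.Dict String Int) (a : List String)
    (k : String) (v : Int) (hk : d.get? k = some v) :
    (ps.foldl (pvStepB L) (d, a)).1.get? k = some v := by
  induction ps generalizing d a with
  | nil => exact hk
  | cons par ps ih =>
    simp only [List.foldl_cons]
    cases h : d.get? par with
    | none =>
      have hne : k ≠ par := by intro he; rw [he, h] at hk; simp at hk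
      simp only [pvStepB, h]
      exact ih _ _ ((PySem.Dict.get?_insert_of_ne d (L + 1) hne).trans hk)
    | some w => simp only [pvStepB, h]; exact ih _ _ hk

-- the value bound survives a pvStepB fold
theorem foldB_bound (L : Int) (ps : List String) (d : PySem.Dict String Int) (a : List String)
    (hb : ∀ k v, d.get? k = some v → v ≤ L + 1) :
    ∀ k v, (ps.foldl (pvStepB L) (d, a)).1.get? k = some v → v ≤ L + 1 := by
  induction ps generalizing d a with
  | nil => exact hb
  | cons par ps ih =>
    simp only [List.foldl_cons]
    cases h : d.get? par with
    | none =>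
      simp only [pvStepB, h]
      refine ih _ _ (fun k v hk => ?_)
      rw [PySem.Dict.get?_insert] at hk
      by_cases he : k = par
      · simp [he] at hk; omega
      · exact hb k v (by simpa [he] using hk)
    | some w => simp only [pvStepB, h]; exact ih _ _ hb

-- under the bound, A's inner fold (with du = L) IS B's inner fold
theorem foldA_eq_foldB (L : Int) (ps : List String) (d : PySem.Dict String Int) (a : List String)
    (hb : ∀ k v, d.get? k = some v → v ≤ L + 1) :
    ps.foldl (pvStepA L) (d, a) = ps.foldl (pvStepB L) (d, a) := by
  induction ps generalizing d a with
  | nil => rfl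
  | cons par ps ih =>
    simp only [List.foldl_cons]
    cases h : d.get? par with
    | none =>
      simp only [pvStepA, pvStepB, h]
      refine ih _ _ (fun k v hk => ?_)
      rw [PySem.Dict.get?_insert] at hk
      by_cases he : k = par
      · simp [he] at hk; omega
      · exact hb k v (by simpa [he] using hk)
    | some w =>
      have : ¬ (L + 1 < w) := not_lt.mpr (hb par w h)
      simp only [pvStepA, pvStepB, h, if_neg this]
      exact ih _ _ hb

-- the accumulator only collects appended output: shift lemma
theorem foldB_acc (L : Int) (ps : List String) (d : PySem.Dict String Int) (a : List String) :
    ps.foldl (pvStepB L) (d, a) =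
      ((ps.foldl (pvStepB L) (d, [])).1, a ++ (ps.foldl (pvStepB L) (d, [])).2) := by
  induction ps generalizing d a with
  | nil => simp
  | cons par ps ih =>
    simp only [List.foldl_cons]
    cases h : d.get? par with
    | none =>
      simp only [pvStepB, h]
      rw [ih _ (a ++ [par]), ih _ ([] ++ [par])]
      simp
    | some w => simp only [pvStepB, h]; exact ih _ a

-- every element the fold appends ends up mapped to L+1
theorem foldB_new (L : Int) (ps : List String) (d : PySem.Dict String Int) (a : List String) :
    ∀ x ∈ (ps.foldl (pvStepB L) (d, a)).2,
      x ∈ a ∨ (ps.foldl (pvStepB L) (d, a)).1.get? x = some (L + 1) := by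
  induction ps generalizing d a with
  | nil => intro x hx; exact Or.inl hx
  | cons par ps ih =>
    simp only [List.foldl_cons]
    cases h : d.get? par with
    | none =>
      simp only [pvStepB, h]
      intro x hx
      rcases ih _ _ x hx with hx' | hx'
      · rcases List.mem_append.mp hx' with hx'' | hx''
        · exact Or.inl hx''
        · right
          have : x = par := by simpa using hx''
          subst this
          exact foldB_pres L ps _ _ x (L + 1) (PySem.Dict.get?_insert_self d x (L + 1))
      · exact Or.inr hx'
    | some w => simp only [pvStepB, h]; exact ih _ _

-- counting: free universe keys + appended nodes never grows across the fold
theorem foldB_count (roots : List String) (parents : List (String × List String)) (L : Int)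
    (ps : List String) (hps : ∀ x ∈ ps, x ∈ pvUniv roots parents)
    (d : PySem.Dict String Int) (a : List String) :
    pvFree roots parents (ps.foldl (pvStepB L) (d, a)).1
      + (ps.foldl (pvStepB L) (d, a)).2.length
      ≤ pvFree roots parents d + a.length := by
  induction ps generalizing d a with
  | nil => simp
  | cons par ps ih =>
    simp only [List.foldl_cons]
    cases h : d.get? par with
    | none =>
      simp only [pvStepB, h]
      have hpar : par ∈ pvUniv roots parents := hps par (List.mem_cons_self ..)
      have hnot : par ∉ d.keys := (PySem.Dict.get?_eq_none_iff_not_mem_keys d par).mp h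
      have hcontains : d.contains par = false := by
        rw [PySem.Dict.contains_eq_decide_mem_keys]; simp [hnot]
      have hkeys : (d.insert par (L + 1)).keys = d.keys ++ [par] :=
        PySem.Dict.keys_insert_of_not_contains d (L + 1) hcontains
      have hfree : pvFree roots parents (d.insert par (L + 1)) + 1 = pvFree roots parents d := by
        unfold pvFree
        rw [hkeys]
        have hset : (d.keys ++ [par]).toFinset = insert par d.keys.toFinset := by
          simp [List.toFinset_append]
        rw [hset, Finset.sdiff_insert]
        have hmem : par ∈ pvUniv roots parents \ d.keys.toFinset := by
          simp [Finset.mem_sdiff, hpar, hnot]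
        rw [Finset.card_erase_of_mem hmem]
        have : 0 < (pvUniv roots parents \ d.keys.toFinset).card := Finset.card_pos.mpr ⟨par, hmem⟩
        omega
      have := ih (fun x hx => hps x (List.mem_cons_of_mem _ hx)) (d.insert par (L + 1)) (a ++ [par])
      simp only [List.length_append, List.length_cons, List.length_nil] at this ⊢
      omega
    | some w =>
      simp only [pvStepB, h]
      exact ih (fun x hx => hps x (List.mem_cons_of_mem _ hx)) d a

-- ===== lifted to a whole level sweep =====

theorem levelB_pres (parents : List (String × List String)) (L : Int) (fr : List String)
    (d : PySem.Dict String Int) (a : List String) (k : String) (v : Int)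
    (hk : d.get? k = some v) : (pvLevelB parents L (d, a) fr).1.get? k = some v := by
  induction fr generalizing d a with
  | nil => exact hk
  | cons u fr ih =>
    simp only [pvLevelB, List.foldl_cons] at ih ⊢
    have h1 := foldB_pres L (pvGetParents parents u) d a k v hk
    rcases hs : (pvGetParents parents u).foldl (pvStepB L) (d, a) with ⟨d', a'⟩
    rw [hs] at h1
    exact ih _ _ h1

theorem levelB_bound (parents : List (String × List String)) (L : Int) (fr : List String)
    (d : PySem.Dict String Int) (a : List String)
    (hb : ∀ k v, d.get? k = some v → v ≤ L + 1) :
    ∀ k v, (pvLevelB parents L (d, a) fr).1.get? k = some v → v ≤ L + 1 := by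
  induction fr generalizing d a with
  | nil => exact hb
  | cons u fr ih =>
    simp only [pvLevelB, List.foldl_cons] at ih ⊢
    have h1 := foldB_bound L (pvGetParents parents u) d a hb
    rcases hs : (pvGetParents parents u).foldl (pvStepB L) (d, a) with ⟨d', a'⟩
    rw [hs] at h1
    exact ih _ _ h1

theorem levelB_acc (parents : List (String × List String)) (L : Int) (fr : List String)
    (d : PySem.Dict String Int) (a : List String) :
    pvLevelB parents L (d, a) fr =
      ((pvLevelB parents L (d, []) fr).1, a ++ (pvLevelB parents L (d, []) fr).2) := by
  induction fr generalizing d a with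
  | nil => simp [pvLevelB]
  | cons u fr ih =>
    simp only [pvLevelB, List.foldl_cons] at ih ⊢
    rcases hs : (pvGetParents parents u).foldl (pvStepB L) (d, []) with ⟨d', e⟩
    have h1 : (pvGetParents parents u).foldl (pvStepB L) (d, a) = (d', a ++ e) := by
      rw [foldB_acc L _ d a, hs]
    rw [h1, ih d' (a ++ e), ih d' e]
    simp

theorem levelB_new (parents : List (String × List String)) (L : Int) (fr : List String)
    (d : PySem.Dict String Int) (a : List String) :
    ∀ x ∈ (pvLevelB parents L (d, a) fr).2,
      x ∈ a ∨ (pvLevelB parents L (d, a) fr).1.get? x = some (L + 1) := by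
  induction fr generalizing d a with
  | nil => intro x hx; exact Or.inl hx
  | cons u fr ih =>
    simp only [pvLevelB, List.foldl_cons] at ih ⊢
    intro x hx
    rcases hs : (pvGetParents parents u).foldl (pvStepB L) (d, a) with ⟨d', a'⟩
    rw [hs] at hx
    rcases ih _ _ x hx with hx' | hx'
    · have := foldB_new L (pvGetParents parents u) d a x (by rw [hs]; exact hx')
      rcases this with h | h
      · exact Or.inl h
      · right
        rw [hs] at h
        exact levelB_pres parents L fr d' a' x (L + 1) h
    · exact Or.inr hx'

theorem levelB_count (roots : List String) (parents : List (String × List String)) (L : Int)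
    (fr : List String) (d : PySem.Dict String Int) (a : List String) :
    pvFree roots parents (pvLevelB parents L (d, a) fr).1
      + (pvLevelB parents L (d, a) fr).2.length
      ≤ pvFree roots parents d + a.length := by
  induction fr generalizing d a with
  | nil => simp [pvLevelB]
  | cons u fr ih =>
    simp only [pvLevelB, List.foldl_cons] at ih ⊢
    have hps : ∀ x ∈ pvGetParents parents u, x ∈ pvUniv roots parents := by
      intro x hx
      unfold pvUniv
      simp only [List.mem_toFinset, List.mem_append]
      exact Or.inr (pvGetParents_sub parents u x hx)
    have h1 := foldB_count roots parents L (pvGetParents parents u) hps d a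
    rcases hs : (pvGetParents parents u).foldl (pvStepB L) (d, a) with ⟨d', a'⟩
    rw [hs] at h1
    exact le_trans (ih d' a') h1

-- ===== the within-level unrolling of A's queue loop =====

theorem loopA_level (parents : List (String × List String)) (L : Int) :
    ∀ (q₁ : List String) (dist : PySem.Dict String Int) (q₂ : List String) (f : Nat),
      (∀ u ∈ q₁, dist.get? u = some L) →
      (∀ k v, dist.get? k = some v → v ≤ L + 1) →
      q₁.length ≤ f →
      pvLoopA parents f dist (q₁ ++ q₂) =
        pvLoopA parents (f - q₁.length) (pvLevelB parents L (dist, []) q₁).1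
          (q₂ ++ (pvLevelB parents L (dist, []) q₁).2) := by
  intro q₁
  induction q₁ with
  | nil => intro dist q₂ f _ _ _; simp [pvLevelB]
  | cons u q₁ ih =>
    intro dist q₂ f hfr hb hf
    rcases f with _ | g
    · simp at hf
    have hdu : dist.getD u 0 = L :=
      PySem.Dict.getD_of_get?_eq_some dist 0 (hfr u (List.mem_cons_self ..))
    have hAB : (pvGetParents parents u).foldl (pvStepA (dist.getD u 0)) (dist, []) =
        (pvGetParents parents u).foldl (pvStepB L) (dist, []) := by
      rw [hdu]; exact foldA_eq_foldB L _ dist [] hb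
    rcases hs : (pvGetParents parents u).foldl (pvStepB L) (dist, []) with ⟨d₁, e₁⟩
    have step : pvLoopA parents (g + 1) dist ((u :: q₁) ++ q₂) =
        pvLoopA parents g d₁ ((q₁ ++ q₂) ++ e₁) := by
      show pvLoopA parents g _ _ = _
      rw [hAB, hs]
      simp
    rw [step, List.append_assoc]
    have hfr' : ∀ w ∈ q₁, d₁.get? w = some L := by
      intro w hw
      have := foldB_pres L (pvGetParents parents u) dist [] w L (hfr w (List.mem_cons_of_mem _ hw))
      rw [hs] at this; exact this
    have hb' : ∀ k v, d₁.get? k = some v → v ≤ L + 1 := by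
      have := foldB_bound L (pvGetParents parents u) dist [] hb
      rw [hs] at this; exact this
    have hf' : q₁.length ≤ g := by simpa using hf
    rw [ih d₁ (q₂ ++ e₁) g hfr' hb' hf']
    have hlev : pvLevelB parents L (dist, []) (u :: q₁) =
        ((pvLevelB parents L (d₁, []) q₁).1, e₁ ++ (pvLevelB parents L (d₁, []) q₁).2) := by
      show pvLevelB parents L ((pvGetParents parents u).foldl (pvStepB L) (dist, [])) q₁ = _
      rw [hs, levelB_acc parents L q₁ d₁ e₁]
    rw [hlev]
    simp only [List.length_cons]
    have : g + 1 - (q₁.length + 1) = g - q₁.length := by omega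
    rw [this, List.append_assoc]

-- ===== the main level-by-level correspondence =====

theorem loopAB (roots : List String) (parents : List (String × List String)) :
    ∀ (n f g : Nat) (dist : PySem.Dict String Int) (front : List String) (L : Int),
      (∀ u ∈ front, dist.get? u = some L) →
      (∀ k v, dist.get? k = some v → v ≤ L) →
      pvFree roots parents dist ≤ n →
      front.length + 2 * pvFree roots parents dist ≤ f →
      1 + pvFree roots parents dist ≤ g →
      pvLoopA parents f dist front = pvLoopB parents g dist front L := by
  intro n
  induction n with
  | zero =>
    intro f g dist front L hfr hb hn hf hg
    -- pvFree = 0: the level sweep can append nothing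
    rcases front with _ | ⟨u, fr⟩
    · rcases f with _ | f <;> rcases g with _ | g <;> rfl
    rcases g with _ | g'
    · omega
    have hb' : ∀ k v, dist.get? k = some v → v ≤ L + 1 := fun k v hk => by
      have := hb k v hk; omega
    have hA := loopA_level parents L (u :: fr) dist [] f hfr hb' (by simp at hf ⊢; omega)
    rcases hs : pvLevelB parents L (dist, []) (u :: fr) with ⟨d₁, nxt⟩
    rw [hs] at hA
    simp only [List.append_nil, List.nil_append] at hA
    have hcnt := levelB_count roots parents L (u :: fr) dist []
    rw [hs] at hcnt
    simp only [List.length_nil, Nat.add_zero] at hcnt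
    have hnxt : nxt = [] := by
      have : nxt.length = 0 := by omega
      exact List.eq_nil_of_length_eq_zero this
    subst hnxt
    have hBstep : pvLoopB parents (g' + 1) dist (u :: fr) L = pvLoopB parents g' d₁ [] (L + 1) := by
      show pvLoopB parents g' (pvLevelB parents L (dist, []) (u :: fr)).1
        (pvLevelB parents L (dist, []) (u :: fr)).2 (L + 1) = _
      rw [hs]
    rw [hA, hBstep]
    rcases f - (u :: fr).length with _ | f' <;> rcases g' with _ | g'' <;> rfl
  | succ n ih =>
    intro f g dist front L hfr hb hn hf hg
    rcases front with _ | ⟨u, fr⟩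
    · rcases f with _ | f <;> rcases g with _ | g <;> rfl
    rcases g with _ | g'
    · omega
    have hb' : ∀ k v, dist.get? k = some v → v ≤ L + 1 := fun k v hk => by
      have := hb k v hk; omega
    have hA := loopA_level parents L (u :: fr) dist [] f hfr hb' (by simp at hf ⊢; omega)
    rcases hs : pvLevelB parents L (dist, []) (u :: fr) with ⟨d₁, nxt⟩
    rw [hs] at hA
    simp only [List.append_nil, List.nil_append] at hA
    have hcnt := levelB_count roots parents L (u :: fr) dist []
    rw [hs] at hcnt
    simp only [List.length_nil, Nat.add_zero] at hcnt
    have hBstep : pvLoopB parents (g' + 1) dist (u :: fr) L = pvLoopB parents g' d₁ nxt (L + 1) := by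
      show pvLoopB parents g' (pvLevelB parents L (dist, []) (u :: fr)).1
        (pvLevelB parents L (dist, []) (u :: fr)).2 (L + 1) = _
      rw [hs]
    rw [hA, hBstep]
    rcases hnil : nxt with _ | ⟨x, nx⟩
    · rcases f - (u :: fr).length with _ | f' <;> rcases g' with _ | g'' <;> rfl
    rw [← hnil]
    have hlen : 1 ≤ nxt.length := by rw [hnil]; simp
    have hfr' : ∀ w ∈ nxt, d₁.get? w = some (L + 1) := by
      intro w hw
      have := levelB_new parents L (u :: fr) dist [] w (by rw [hs]; exact hw)
      rw [hs] at this
      rcases this with h | h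
      · simp at h
      · exact h
    have hb₁ : ∀ k v, d₁.get? k = some v → v ≤ L + 1 := by
      have := levelB_bound parents L (u :: fr) dist [] hb'
      rw [hs] at this; exact this
    exact ih (f - (u :: fr).length) g' d₁ nxt (L + 1) hfr' hb₁ (by omega)
      (by simp only [List.length_cons] at hf ⊢; omega) (by omega)

-- ===== initialisation facts =====

theorem init_inv (rs : List String) :
    ∀ (d : PySem.Dict String Int) (a : List String),
      (∀ k v, d.get? k = some v → v = 0) →
      (∀ u ∈ a, d.get? u = some 0) →
      (∀ k v, (rs.foldl
          (fun (p : PySem.Dict String Int × List String) r =>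
            if p.1.contains r then p else (p.1.insert r 0, p.2 ++ [r])) (d, a)).1.get? k = some v → v = 0)
      ∧ (∀ u ∈ (rs.foldl
          (fun (p : PySem.Dict String Int × List String) r =>
            if p.1.contains r then p else (p.1.insert r 0, p.2 ++ [r])) (d, a)).2,
            (rs.foldl
          (fun (p : PySem.Dict String Int × List String) r =>
            if p.1.contains r then p else (p.1.insert r 0, p.2 ++ [r])) (d, a)).1.get? u = some 0)
      ∧ (rs.foldl
          (fun (p : PySem.Dict String Int × List String) r =>
            if p.1.contains r then p else (p.1.insert r 0, p.2 ++ [r])) (d, a)).2.length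
          ≤ a.length + rs.length := by
  induction rs with
  | nil => intro d a hb ha; exact ⟨hb, ha, by simp⟩
  | cons r rs ih =>
    intro d a hb ha
    simp only [List.foldl_cons]
    by_cases hc : d.contains r = true
    · simp only [hc, if_true]
      obtain ⟨h1, h2, h3⟩ := ih d a hb ha
      exact ⟨h1, h2, by simp only [List.length_cons]; omega⟩
    · have hc' : d.contains r = false := by simpa using hc
      simp only [hc', Bool.false_eq_true, if_false]
      have hrnone : d.get? r = none := by
        exact (PySem.Dict.get?_eq_none_iff_contains d r).mpr hc'
      have hb' : ∀ k v, (d.insert r 0).get? k = some v → v = 0 := by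
        intro k v hk
        rw [PySem.Dict.get?_insert] at hk
        by_cases he : k = r
        · simp [he] at hk; omega
        · exact hb k v (by simpa [he] using hk)
      have ha' : ∀ u ∈ a ++ [r], (d.insert r 0).get? u = some 0 := by
        intro u hu
        rcases List.mem_append.mp hu with h' | h'
        · have hne : u ≠ r := by
            intro he; rw [he] at h'; have := ha r h'; rw [hrnone] at this; simp at this
          rw [PySem.Dict.get?_insert_of_ne d 0 hne]
          exact ha u h'
        · have : u = r := by simpa using h'
          subst this
          exact PySem.Dict.get?_insert_self d u 0
      obtain ⟨h1, h2, h3⟩ := ih (d.insert r 0) (a ++ [r]) hb' ha'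
      exact ⟨h1, h2, by simp at h3 ⊢; omega⟩

theorem loopB_nil (parents : List (String × List String)) (f : Nat)
    (dist : PySem.Dict String Int) (L : Int) : pvLoopB parents f dist [] L = dist := by
  cases f <;> rfl

theorem min_hops_upward_from_roots_spec : Claim_equal_min_hops_upward_from_roots := by
  intro roots parents _
  unfold Spec_min_hops_upward_from_roots min_hops_upward_from_roots min_hops_upward_from_roots_alt
  by_cases hr : roots = []
  · subst hr
    show ([] : List (String × Int)) =
      (pvLoopB parents (pvFuel [] parents) (pvInit []).1 (pvInit []).2 0).items
    have h0 : pvInit ([] : List String) = (PySem.Dict.empty, []) := rfl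
    rw [h0, loopB_nil]
    rfl
  · simp only [if_neg hr]
    show (pvLoopA parents (pvFuel roots parents) (pvInit roots).1 (pvInit roots).2).items =
      (pvLoopB parents (pvFuel roots parents) (pvInit roots).1 (pvInit roots).2 0).items
    rcases hI : pvInit roots with ⟨d₀, q₀⟩
    have hI' : roots.foldl
        (fun (p : PySem.Dict String Int × List String) r =>
          if p.1.contains r then p else (p.1.insert r 0, p.2 ++ [r]))
        (PySem.Dict.empty, []) = (d₀, q₀) := hI
    obtain ⟨h1, h2, h3⟩ := init_inv roots PySem.Dict.empty []
      (by intro k v hk; rw [PySem.Dict.get?_empty] at hk; simp at hk)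
      (by intro u hu; simp at hu)
    rw [hI'] at h1 h2 h3
    have hb0 : ∀ k v, d₀.get? k = some v → v ≤ (0 : Int) := fun k v hk => le_of_eq (h1 k v hk)
    have hfree : pvFree roots parents d₀ ≤
        roots.length + (parents.flatMap (fun p => p.2)).length := by
      calc pvFree roots parents d₀ ≤ (pvUniv roots parents).card :=
            Finset.card_le_card Finset.sdiff_subset
        _ ≤ (roots ++ parents.flatMap (fun p => p.2)).length := List.toFinset_card_le _
        _ = roots.length + (parents.flatMap (fun p => p.2)).length := by simp
    have hq0 : q₀.length ≤ roots.length := by simpa using h3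
    have hmain := loopAB roots parents (pvFree roots parents d₀)
      (pvFuel roots parents) (pvFuel roots parents) d₀ q₀ 0 h2 hb0 le_rfl
      (by unfold pvFuel; omega) (by unfold pvFuel; omega)
    exact congrArg PySem.Dict.items hmain
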